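-- pv_equiv track=rewrite | github.com/FredrikJ71/py_coding_theory | modules/polynomials_pct.py | next_poly
-- ===== SOURCE A (Python) =====
-- def next_poly(poly, p):
--     """return the next polynomial in lexicographic order."""
--     # take care of the case for length 0
--     if len(poly) == 0:
--         return []
--
--     # add 1 to degree with least degree
--     new_poly = poly.copy()
--     new_poly[0] += 1
--
--     #if coefficient reached p, update next coefficient
--     if new_poly[0] == p:
--         new_poly = [0] + next_poly(new_poly[1:], p)
--     return new_poly
-- ===== SOURCE B (Python) =====
-- def next_poly(poly, p):
--     """return the next polynomial in lexicographic order."""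
--     new_poly = poly.copy()
--     for i in range(len(new_poly)):
--         new_poly[i] += 1
--         if new_poly[i] == p:
--             new_poly[i] = 0
--         else:
--             break
--     return new_poly
-- ===== Notes on version B (the rewrite author's own statement) =====
-- stated objective: idiomatic
-- what changed: Replaces the slicing recursion ([0] + next_poly(poly[1:], p)) with a single in-place carry-propagation loop over a copied list that breaks as soon as no carry occurs.
import Mathlib
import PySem

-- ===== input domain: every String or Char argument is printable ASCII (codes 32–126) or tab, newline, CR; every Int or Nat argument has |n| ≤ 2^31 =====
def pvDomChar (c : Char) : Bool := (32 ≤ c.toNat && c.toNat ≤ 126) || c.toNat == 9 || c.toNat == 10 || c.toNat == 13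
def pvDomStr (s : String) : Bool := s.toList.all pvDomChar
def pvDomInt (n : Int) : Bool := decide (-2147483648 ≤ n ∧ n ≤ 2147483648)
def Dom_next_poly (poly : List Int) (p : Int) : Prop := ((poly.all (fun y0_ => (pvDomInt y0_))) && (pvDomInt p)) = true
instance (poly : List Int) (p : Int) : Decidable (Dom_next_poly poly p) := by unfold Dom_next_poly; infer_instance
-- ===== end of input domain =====

-- ===== PORT A =====
-- B replaces A's slicing recursion by an in-place carry loop with early break (return value unchanged).
def next_poly (poly : List Int) (p : Int) : List Int :=
  match poly with
  | [] => []
  | c :: rest =>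
    -- new_poly = poly.copy(); new_poly[0] += 1
    let v := c + 1
    -- if new_poly[0] == p: new_poly = [0] + next_poly(new_poly[1:], p)
    if v = p then 0 :: next_poly rest p else v :: rest

-- ===== PORT B =====
-- loop body of B: for i in range(len(new_poly)): new_poly[i] += 1; if == p set 0 else break
def nextLoop (p : Int) (arr : Array Int) (i : Nat) : Array Int :=
  if h : i < arr.size then
    let v := arr[i] + 1
    if v = p then nextLoop p (arr.set i 0) (i + 1)
    else arr.set i v
  else arr
termination_by arr.size - i
decreasing_by simp [Array.size_set]; omega

def next_poly_alt (poly : List Int) (p : Int) : List Int :=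
  (nextLoop p poly.toArray 0).toList

-- ===== PRECONDITION & SPEC =====
def Spec_next_poly (poly : List Int) (p : Int) (out : List Int) : Prop := out = next_poly_alt poly p
instance (poly : List Int) (p : Int) (out : List Int) : Decidable (Spec_next_poly poly p out) := by unfold Spec_next_poly; infer_instance

-- ===== CLAIM (what is proved, stated in full; the proofs are below) =====
def Claim_equal_next_poly : Prop := ∀ (poly : List Int) (p : Int), Dom_next_poly poly p → Spec_next_poly poly p (next_poly poly p)

-- ===== LEMMAS AND PROOFS =====

theorem nextLoop_eq (p : Int) : ∀ (pre suf : List Int) (arr : Array Int),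
    arr.toList = pre ++ suf →
    (nextLoop p arr pre.length).toList = pre ++ next_poly suf p := by
  intro pre suf
  induction suf generalizing pre with
  | nil =>
    intro arr harr
    unfold nextLoop
    have hsz : arr.size = pre.length := by
      simp [← Array.length_toList, harr]
    rw [dif_neg (by omega)]
    simp [harr, next_poly]
  | cons c rest ih =>
    intro arr harr
    have hsz : arr.size = pre.length + (c :: rest).length := by
      simp [← Array.length_toList, harr]
    have hlt : pre.length < arr.size := by simp [hsz]
    have hget : arr[pre.length] = c := by
      have h1 : arr.toList[pre.length]'(by simp [harr]) = c := by
        simp [harr, List.getElem_append_right]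
      simpa using h1
    unfold nextLoop
    rw [dif_pos hlt, hget]
    by_cases hp : c + 1 = p
    · rw [if_pos hp]
      have hset : (arr.set pre.length 0).toList = (pre ++ [0]) ++ rest := by
        simp [Array.toList_set, harr]
      have := ih (pre ++ [(0:Int)]) (arr.set pre.length 0 (by simpa using hlt)) hset
      simp at this
      rw [show pre.length + 1 = (pre ++ [(0:Int)]).length by simp] at *
      rw [this]
      simp [next_poly, hp]
    · rw [if_neg hp]
      simp [Array.toList_set, harr, next_poly, hp]

-- ===== VERDICT (by name: the statement is the Claim_ definition above) =====
theorem next_poly_spec : Claim_equal_next_poly := by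
  intro poly p _
  unfold Spec_next_poly next_poly_alt
  have := nextLoop_eq p [] poly poly.toArray (by simp)
  simpa using this.symm
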